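-- pv_equiv track=rewrite | github.com/lengthwisehems/retail2 | dl1961_inventory.py | determine_color_simplified
-- ===== SOURCE A (Python) =====
-- from typing import Any, Dict, Iterable, List, Optional, Tuple
--
-- def determine_color_simplified(tags: Iterable[str]) -> str:
--     lower_tags = {t.lower() for t in tags}
--     if any(tag in lower_tags for tag in {"wash:mid", "midwash"}):
--         return "Medium"
--     if any(tag in lower_tags for tag in {"dark", "darkindigo", "darkwash", "wash:black", "wash:dark", "tinteddark"}):
--         return "Dark"
--     if any(tag in lower_tags for tag in {"wash:white", "wash:light", "wash:lightwash"}):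
--         return "Light"
--     if any(tag in lower_tags for tag in {"wash:neutrals", "wash:other"}):
--         return "Other"
--     return ""
-- ===== SOURCE B (Python) =====
-- _RANK = {
--     "wash:mid": 0, "midwash": 0,
--     "dark": 1, "darkindigo": 1, "darkwash": 1,
--     "wash:black": 1, "wash:dark": 1, "tinteddark": 1,
--     "wash:white": 2, "wash:light": 2, "wash:lightwash": 2,
--     "wash:neutrals": 3, "wash:other": 3,
-- }
-- _NAMES = ["Medium", "Dark", "Light", "Other", ""]
--
-- def determine_color_simplified(tags):
--     best = 4
--     for t in tags:
--         r = _RANK.get(t.lower(), 4)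
--         if r < best:
--             best = r
--     return _NAMES[best]
-- ===== Notes on version B (the rewrite author's own statement) =====
-- stated objective: alternative
-- what changed: Replaces the build-a-set-then-test-four-category-sets cascade with a single pass over the tags that keeps a running minimum priority rank looked up in one precomputed tag->rank dict, then indexes a name table.
import Mathlib
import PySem

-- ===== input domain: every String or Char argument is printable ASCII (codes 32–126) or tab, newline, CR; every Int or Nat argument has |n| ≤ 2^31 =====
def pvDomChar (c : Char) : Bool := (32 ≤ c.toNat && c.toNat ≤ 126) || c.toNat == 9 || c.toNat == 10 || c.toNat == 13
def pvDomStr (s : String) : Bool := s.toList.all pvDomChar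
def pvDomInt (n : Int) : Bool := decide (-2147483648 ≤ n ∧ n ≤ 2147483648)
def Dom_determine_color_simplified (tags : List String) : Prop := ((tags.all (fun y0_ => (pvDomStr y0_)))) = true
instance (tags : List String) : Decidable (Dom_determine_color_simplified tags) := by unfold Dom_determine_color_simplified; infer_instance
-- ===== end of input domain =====

-- B replaces A's build-a-set-then-test-four-fixed-sets cascade with one pass keeping a
-- running minimum priority rank from a tag->rank dict (alternative decomposition, same cost).


-- ===== PORT A =====
def determine_color_simplified (tags : List String) : String :=
  let lower_tags : PySem.Set String := PySem.Set.ofList (tags.map (fun t => PySem.Str.lower t))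
  -- any(tag in lower_tags for tag in {…}): a disjunction of set-membership tests (order-independent)
  if PySem.Set.contains lower_tags "wash:mid" || PySem.Set.contains lower_tags "midwash" then
    "Medium"
  else if PySem.Set.contains lower_tags "dark" || PySem.Set.contains lower_tags "darkindigo" ||
      PySem.Set.contains lower_tags "darkwash" || PySem.Set.contains lower_tags "wash:black" ||
      PySem.Set.contains lower_tags "wash:dark" || PySem.Set.contains lower_tags "tinteddark" then
    "Dark"
  else if PySem.Set.contains lower_tags "wash:white" || PySem.Set.contains lower_tags "wash:light" ||
      PySem.Set.contains lower_tags "wash:lightwash" then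
    "Light"
  else if PySem.Set.contains lower_tags "wash:neutrals" || PySem.Set.contains lower_tags "wash:other" then
    "Other"
  else
    ""

-- ===== PORT B =====
def pvRank : PySem.Dict String Int := PySem.Dict.ofList
  [("wash:mid", 0), ("midwash", 0),
   ("dark", 1), ("darkindigo", 1), ("darkwash", 1),
   ("wash:black", 1), ("wash:dark", 1), ("tinteddark", 1),
   ("wash:white", 2), ("wash:light", 2), ("wash:lightwash", 2),
   ("wash:neutrals", 3), ("wash:other", 3)]

def pvNames : List String := ["Medium", "Dark", "Light", "Other", ""]

def determine_color_simplified_alt (tags : List String) : String :=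
  let best : Int := tags.foldl (fun best t =>
    let r := pvRank.getD (PySem.Str.lower t) 4
    if r < best then r else best) 4
  PySem.List.pyGetD pvNames best ""

-- ===== PRECONDITION & SPEC =====
def Spec_determine_color_simplified (tags : List String) (out : String) : Prop := out = determine_color_simplified_alt tags
instance (tags : List String) (out : String) : Decidable (Spec_determine_color_simplified tags out) := by unfold Spec_determine_color_simplified; infer_instance

-- ===== CLAIM (what is proved, stated in full; the proofs are below) =====
def Claim_equal_determine_color_simplified : Prop := ∀ (tags : List String), Dom_determine_color_simplified tags → Spec_determine_color_simplified tags (determine_color_simplified tags)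

-- ===== LEMMAS AND PROOFS =====

-- the per-tag rank B looks up
def pvStep (t : String) : Int := pvRank.getD (PySem.Str.lower t) 4

-- recursive form of B's running minimum
def pvMinr : List String → Int
  | [] => 4
  | t :: ts => min (pvStep t) (pvMinr ts)

set_option maxHeartbeats 2000000 in
lemma pvStep_char (t : String) :
    pvStep t =
      if "wash:mid" = PySem.Str.lower t then 0
      else if "midwash" = PySem.Str.lower t then 0
      else if "dark" = PySem.Str.lower t then 1
      else if "darkindigo" = PySem.Str.lower t then 1
      else if "darkwash" = PySem.Str.lower t then 1
      else if "wash:black" = PySem.Str.lower t then 1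
      else if "wash:dark" = PySem.Str.lower t then 1
      else if "tinteddark" = PySem.Str.lower t then 1
      else if "wash:white" = PySem.Str.lower t then 2
      else if "wash:light" = PySem.Str.lower t then 2
      else if "wash:lightwash" = PySem.Str.lower t then 2
      else if "wash:neutrals" = PySem.Str.lower t then 3
      else if "wash:other" = PySem.Str.lower t then 3
      else 4 := by
  have h : pvRank = PySem.Dict.mk
      [("wash:mid", 0), ("midwash", 0),
       ("dark", 1), ("darkindigo", 1), ("darkwash", 1),
       ("wash:black", 1), ("wash:dark", 1), ("tinteddark", 1),
       ("wash:white", 2), ("wash:light", 2), ("wash:lightwash", 2),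
       ("wash:neutrals", 3), ("wash:other", 3)] := by decide
  unfold pvStep PySem.Dict.getD
  rw [h]
  simp only [PySem.Dict.get?_mk_cons, beq_iff_eq]
  clear h
  generalize PySem.Str.lower t = s
  by_cases h0 : "wash:mid" = s
  · simp only [if_pos h0]; rfl
  simp only [if_neg h0]
  by_cases h1 : "midwash" = s
  · simp only [if_pos h1]; rfl
  simp only [if_neg h1]
  by_cases h2 : "dark" = s
  · simp only [if_pos h2]; rfl
  simp only [if_neg h2]
  by_cases h3 : "darkindigo" = s
  · simp only [if_pos h3]; rfl
  simp only [if_neg h3]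
  by_cases h4 : "darkwash" = s
  · simp only [if_pos h4]; rfl
  simp only [if_neg h4]
  by_cases h5 : "wash:black" = s
  · simp only [if_pos h5]; rfl
  simp only [if_neg h5]
  by_cases h6 : "wash:dark" = s
  · simp only [if_pos h6]; rfl
  simp only [if_neg h6]
  by_cases h7 : "tinteddark" = s
  · simp only [if_pos h7]; rfl
  simp only [if_neg h7]
  by_cases h8 : "wash:white" = s
  · simp only [if_pos h8]; rfl
  simp only [if_neg h8]
  by_cases h9 : "wash:light" = s
  · simp only [if_pos h9]; rfl
  simp only [if_neg h9]
  by_cases h10 : "wash:lightwash" = s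
  · simp only [if_pos h10]; rfl
  simp only [if_neg h10]
  by_cases h11 : "wash:neutrals" = s
  · simp only [if_pos h11]; rfl
  simp only [if_neg h11]
  by_cases h12 : "wash:other" = s
  · simp only [if_pos h12]; rfl
  simp only [if_neg h12]
  rfl

lemma pvStep_le0 (t : String) : pvStep t ≤ 0 ↔
    ("wash:mid" = PySem.Str.lower t ∨ "midwash" = PySem.Str.lower t) := by
  rw [pvStep_char]; generalize PySem.Str.lower t = s
  by_cases h0 : "wash:mid" = s
  · simp only [if_pos h0]; simp_all
  simp only [if_neg h0]
  by_cases h1 : "midwash" = s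
  · simp only [if_pos h1]; simp_all
  simp only [if_neg h1]
  by_cases h2 : "dark" = s
  · simp only [if_pos h2]; simp_all
  simp only [if_neg h2]
  by_cases h3 : "darkindigo" = s
  · simp only [if_pos h3]; simp_all
  simp only [if_neg h3]
  by_cases h4 : "darkwash" = s
  · simp only [if_pos h4]; simp_all
  simp only [if_neg h4]
  by_cases h5 : "wash:black" = s
  · simp only [if_pos h5]; simp_all
  simp only [if_neg h5]
  by_cases h6 : "wash:dark" = s
  · simp only [if_pos h6]; simp_all
  simp only [if_neg h6]
  by_cases h7 : "tinteddark" = s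
  · simp only [if_pos h7]; simp_all
  simp only [if_neg h7]
  by_cases h8 : "wash:white" = s
  · simp only [if_pos h8]; simp_all
  simp only [if_neg h8]
  by_cases h9 : "wash:light" = s
  · simp only [if_pos h9]; simp_all
  simp only [if_neg h9]
  by_cases h10 : "wash:lightwash" = s
  · simp only [if_pos h10]; simp_all
  simp only [if_neg h10]
  by_cases h11 : "wash:neutrals" = s
  · simp only [if_pos h11]; simp_all
  simp only [if_neg h11]
  by_cases h12 : "wash:other" = s
  · simp only [if_pos h12]; simp_all
  simp only [if_neg h12]
  simp_all

lemma pvStep_le1 (t : String) : pvStep t ≤ 1 ↔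
    ("wash:mid" = PySem.Str.lower t ∨ "midwash" = PySem.Str.lower t ∨
     "dark" = PySem.Str.lower t ∨ "darkindigo" = PySem.Str.lower t ∨
     "darkwash" = PySem.Str.lower t ∨ "wash:black" = PySem.Str.lower t ∨
     "wash:dark" = PySem.Str.lower t ∨ "tinteddark" = PySem.Str.lower t) := by
  rw [pvStep_char]; generalize PySem.Str.lower t = s
  by_cases h0 : "wash:mid" = s
  · simp only [if_pos h0]; simp_all
  simp only [if_neg h0]
  by_cases h1 : "midwash" = s
  · simp only [if_pos h1]; simp_all
  simp only [if_neg h1]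
  by_cases h2 : "dark" = s
  · simp only [if_pos h2]; simp_all
  simp only [if_neg h2]
  by_cases h3 : "darkindigo" = s
  · simp only [if_pos h3]; simp_all
  simp only [if_neg h3]
  by_cases h4 : "darkwash" = s
  · simp only [if_pos h4]; simp_all
  simp only [if_neg h4]
  by_cases h5 : "wash:black" = s
  · simp only [if_pos h5]; simp_all
  simp only [if_neg h5]
  by_cases h6 : "wash:dark" = s
  · simp only [if_pos h6]; simp_all
  simp only [if_neg h6]
  by_cases h7 : "tinteddark" = s
  · simp only [if_pos h7]; simp_all
  simp only [if_neg h7]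
  by_cases h8 : "wash:white" = s
  · simp only [if_pos h8]; simp_all
  simp only [if_neg h8]
  by_cases h9 : "wash:light" = s
  · simp only [if_pos h9]; simp_all
  simp only [if_neg h9]
  by_cases h10 : "wash:lightwash" = s
  · simp only [if_pos h10]; simp_all
  simp only [if_neg h10]
  by_cases h11 : "wash:neutrals" = s
  · simp only [if_pos h11]; simp_all
  simp only [if_neg h11]
  by_cases h12 : "wash:other" = s
  · simp only [if_pos h12]; simp_all
  simp only [if_neg h12]
  simp_all

lemma pvStep_le2 (t : String) : pvStep t ≤ 2 ↔
    ("wash:mid" = PySem.Str.lower t ∨ "midwash" = PySem.Str.lower t ∨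
     "dark" = PySem.Str.lower t ∨ "darkindigo" = PySem.Str.lower t ∨
     "darkwash" = PySem.Str.lower t ∨ "wash:black" = PySem.Str.lower t ∨
     "wash:dark" = PySem.Str.lower t ∨ "tinteddark" = PySem.Str.lower t ∨
     "wash:white" = PySem.Str.lower t ∨ "wash:light" = PySem.Str.lower t ∨
     "wash:lightwash" = PySem.Str.lower t) := by
  rw [pvStep_char]; generalize PySem.Str.lower t = s
  by_cases h0 : "wash:mid" = s
  · simp only [if_pos h0]; simp_all
  simp only [if_neg h0]
  by_cases h1 : "midwash" = s
  · simp only [if_pos h1]; simp_all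
  simp only [if_neg h1]
  by_cases h2 : "dark" = s
  · simp only [if_pos h2]; simp_all
  simp only [if_neg h2]
  by_cases h3 : "darkindigo" = s
  · simp only [if_pos h3]; simp_all
  simp only [if_neg h3]
  by_cases h4 : "darkwash" = s
  · simp only [if_pos h4]; simp_all
  simp only [if_neg h4]
  by_cases h5 : "wash:black" = s
  · simp only [if_pos h5]; simp_all
  simp only [if_neg h5]
  by_cases h6 : "wash:dark" = s
  · simp only [if_pos h6]; simp_all
  simp only [if_neg h6]
  by_cases h7 : "tinteddark" = s
  · simp only [if_pos h7]; simp_all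
  simp only [if_neg h7]
  by_cases h8 : "wash:white" = s
  · simp only [if_pos h8]; simp_all
  simp only [if_neg h8]
  by_cases h9 : "wash:light" = s
  · simp only [if_pos h9]; simp_all
  simp only [if_neg h9]
  by_cases h10 : "wash:lightwash" = s
  · simp only [if_pos h10]; simp_all
  simp only [if_neg h10]
  by_cases h11 : "wash:neutrals" = s
  · simp only [if_pos h11]; simp_all
  simp only [if_neg h11]
  by_cases h12 : "wash:other" = s
  · simp only [if_pos h12]; simp_all
  simp only [if_neg h12]
  simp_all

lemma pvStep_le3 (t : String) : pvStep t ≤ 3 ↔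
    ("wash:mid" = PySem.Str.lower t ∨ "midwash" = PySem.Str.lower t ∨
     "dark" = PySem.Str.lower t ∨ "darkindigo" = PySem.Str.lower t ∨
     "darkwash" = PySem.Str.lower t ∨ "wash:black" = PySem.Str.lower t ∨
     "wash:dark" = PySem.Str.lower t ∨ "tinteddark" = PySem.Str.lower t ∨
     "wash:white" = PySem.Str.lower t ∨ "wash:light" = PySem.Str.lower t ∨
     "wash:lightwash" = PySem.Str.lower t ∨
     "wash:neutrals" = PySem.Str.lower t ∨ "wash:other" = PySem.Str.lower t) := by
  rw [pvStep_char]; generalize PySem.Str.lower t = s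
  by_cases h0 : "wash:mid" = s
  · simp only [if_pos h0]; simp_all
  simp only [if_neg h0]
  by_cases h1 : "midwash" = s
  · simp only [if_pos h1]; simp_all
  simp only [if_neg h1]
  by_cases h2 : "dark" = s
  · simp only [if_pos h2]; simp_all
  simp only [if_neg h2]
  by_cases h3 : "darkindigo" = s
  · simp only [if_pos h3]; simp_all
  simp only [if_neg h3]
  by_cases h4 : "darkwash" = s
  · simp only [if_pos h4]; simp_all
  simp only [if_neg h4]
  by_cases h5 : "wash:black" = s
  · simp only [if_pos h5]; simp_all
  simp only [if_neg h5]
  by_cases h6 : "wash:dark" = s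
  · simp only [if_pos h6]; simp_all
  simp only [if_neg h6]
  by_cases h7 : "tinteddark" = s
  · simp only [if_pos h7]; simp_all
  simp only [if_neg h7]
  by_cases h8 : "wash:white" = s
  · simp only [if_pos h8]; simp_all
  simp only [if_neg h8]
  by_cases h9 : "wash:light" = s
  · simp only [if_pos h9]; simp_all
  simp only [if_neg h9]
  by_cases h10 : "wash:lightwash" = s
  · simp only [if_pos h10]; simp_all
  simp only [if_neg h10]
  by_cases h11 : "wash:neutrals" = s
  · simp only [if_pos h11]; simp_all
  simp only [if_neg h11]
  by_cases h12 : "wash:other" = s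
  · simp only [if_pos h12]; simp_all
  simp only [if_neg h12]
  simp_all

lemma pvStep_nonneg (t : String) : 0 ≤ pvStep t := by
  rw [pvStep_char]; generalize PySem.Str.lower t = s
  by_cases h0 : "wash:mid" = s
  · simp only [if_pos h0]; norm_num
  simp only [if_neg h0]
  by_cases h1 : "midwash" = s
  · simp only [if_pos h1]; norm_num
  simp only [if_neg h1]
  by_cases h2 : "dark" = s
  · simp only [if_pos h2]; norm_num
  simp only [if_neg h2]
  by_cases h3 : "darkindigo" = s
  · simp only [if_pos h3]; norm_num
  simp only [if_neg h3]
  by_cases h4 : "darkwash" = s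
  · simp only [if_pos h4]; norm_num
  simp only [if_neg h4]
  by_cases h5 : "wash:black" = s
  · simp only [if_pos h5]; norm_num
  simp only [if_neg h5]
  by_cases h6 : "wash:dark" = s
  · simp only [if_pos h6]; norm_num
  simp only [if_neg h6]
  by_cases h7 : "tinteddark" = s
  · simp only [if_pos h7]; norm_num
  simp only [if_neg h7]
  by_cases h8 : "wash:white" = s
  · simp only [if_pos h8]; norm_num
  simp only [if_neg h8]
  by_cases h9 : "wash:light" = s
  · simp only [if_pos h9]; norm_num
  simp only [if_neg h9]
  by_cases h10 : "wash:lightwash" = s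
  · simp only [if_pos h10]; norm_num
  simp only [if_neg h10]
  by_cases h11 : "wash:neutrals" = s
  · simp only [if_pos h11]; norm_num
  simp only [if_neg h11]
  by_cases h12 : "wash:other" = s
  · simp only [if_pos h12]; norm_num
  simp only [if_neg h12]
  norm_num

lemma pvMinr_nonneg (tags : List String) : 0 ≤ pvMinr tags := by
  induction tags with
  | nil => norm_num [pvMinr]
  | cons t ts ih => simp only [pvMinr, le_min_iff]; exact ⟨pvStep_nonneg t, ih⟩

lemma pvMinr_le_four (tags : List String) : pvMinr tags ≤ 4 := by
  induction tags with
  | nil => norm_num [pvMinr]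
  | cons t ts ih => simp only [pvMinr, min_le_iff]; exact Or.inr ih

lemma pvMinr_le_iff (tags : List String) (k : Int) (hk : k < 4) :
    pvMinr tags ≤ k ↔ ∃ t ∈ tags, pvStep t ≤ k := by
  induction tags with
  | nil => simp only [pvMinr, List.not_mem_nil]; constructor
           · intro h; omega
           · rintro ⟨t, ht, -⟩; exact absurd ht (by simp)
  | cons t ts ih =>
    simp only [pvMinr, min_le_iff, ih, List.mem_cons]
    constructor
    · rintro (h | ⟨u, hu, hle⟩)
      · exact ⟨t, Or.inl rfl, h⟩
      · exact ⟨u, Or.inr hu, hle⟩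
    · rintro ⟨u, (rfl | hu), hle⟩
      · exact Or.inl hle
      · exact Or.inr ⟨u, hu, hle⟩

lemma pvFoldl_eq_min (tags : List String) (b : Int) (hb : b ≤ 4) :
    tags.foldl (fun best t =>
      let r := pvRank.getD (PySem.Str.lower t) 4
      if r < best then r else best) b = min b (pvMinr tags) := by
  induction tags generalizing b with
  | nil =>
    simp only [List.foldl_nil, pvMinr]
    omega
  | cons t ts ih =>
    have hstep : (let r := pvRank.getD (PySem.Str.lower t) 4
        if r < b then r else b) = min b (pvStep t) := by
      show (if pvStep t < b then pvStep t else b) = min b (pvStep t)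
      rw [min_def]; split_ifs <;> omega
    simp only [List.foldl_cons, hstep, pvMinr]
    rw [ih (min b (pvStep t)) (le_trans (min_le_left _ _) hb)]
    rw [min_assoc]

-- "s ∈ lowered tags" as an existential, oriented as the pvStep lemmas state it
lemma pvMem_lower (tags : List String) (s : String) :
    s ∈ tags.map (fun t => PySem.Str.lower t) ↔ ∃ t ∈ tags, s = PySem.Str.lower t := by
  simp only [List.mem_map]
  constructor
  · rintro ⟨t, ht, rfl⟩; exact ⟨t, ht, rfl⟩
  · rintro ⟨t, ht, rfl⟩; exact ⟨t, ht, rfl⟩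

-- ===== VERDICT (by name: the statement is the Claim_ definition above) =====
set_option maxHeartbeats 2000000 in
theorem determine_color_simplified_spec : Claim_equal_determine_color_simplified := by
  intro tags _
  unfold Spec_determine_color_simplified determine_color_simplified determine_color_simplified_alt
  rw [pvFoldl_eq_min tags 4 le_rfl, min_eq_right (pvMinr_le_four tags)]
  have hmem : ∀ s : String,
      PySem.Set.contains (PySem.Set.ofList (tags.map (fun t => PySem.Str.lower t))) s = true ↔
      ∃ t ∈ tags, s = PySem.Str.lower t := by
    intro s
    rw [← pvMem_lower]
    simp [PySem.Set.contains, PySem.Set.mem_ofList]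
  simp only [Bool.or_eq_true, hmem]
  have h0 := pvMinr_le_iff tags 0 (by norm_num)
  have h1 := pvMinr_le_iff tags 1 (by norm_num)
  have h2 := pvMinr_le_iff tags 2 (by norm_num)
  have h3 := pvMinr_le_iff tags 3 (by norm_num)
  have hlo := pvMinr_nonneg tags
  split_ifs with c0 c1 c2 c3
  · have hle : pvMinr tags ≤ 0 := h0.mpr (by
      rcases c0 with (he0 | he1)
      · obtain ⟨t, ht, he⟩ := he0
        exact ⟨t, ht, (pvStep_le0 t).mpr (Or.inl (he))⟩
      · obtain ⟨t, ht, he⟩ := he1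
        exact ⟨t, ht, (pvStep_le0 t).mpr (Or.inr (he))⟩
      )
    have hm : pvMinr tags = 0 := le_antisymm hle hlo
    rw [hm]; rfl
  · have hle : pvMinr tags ≤ 1 := h1.mpr (by
      rcases c1 with (((((he0 | he1) | he2) | he3) | he4) | he5)
      · obtain ⟨t, ht, he⟩ := he0
        exact ⟨t, ht, (pvStep_le1 t).mpr (Or.inr (Or.inr (Or.inl (he))))⟩
      · obtain ⟨t, ht, he⟩ := he1
        exact ⟨t, ht, (pvStep_le1 t).mpr (Or.inr (Or.inr (Or.inr (Or.inl (he)))))⟩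
      · obtain ⟨t, ht, he⟩ := he2
        exact ⟨t, ht, (pvStep_le1 t).mpr (Or.inr (Or.inr (Or.inr (Or.inr (Or.inl (he))))))⟩
      · obtain ⟨t, ht, he⟩ := he3
        exact ⟨t, ht, (pvStep_le1 t).mpr (Or.inr (Or.inr (Or.inr (Or.inr (Or.inr (Or.inl (he)))))))⟩
      · obtain ⟨t, ht, he⟩ := he4
        exact ⟨t, ht, (pvStep_le1 t).mpr (Or.inr (Or.inr (Or.inr (Or.inr (Or.inr (Or.inr (Or.inl (he))))))))⟩
      · obtain ⟨t, ht, he⟩ := he5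
        exact ⟨t, ht, (pvStep_le1 t).mpr (Or.inr (Or.inr (Or.inr (Or.inr (Or.inr (Or.inr (Or.inr (he))))))))⟩
      )
    have hgt : ¬ pvMinr tags ≤ 0 := by
      intro hcon
      rcases h0.mp hcon with ⟨t, ht, hs⟩
      rcases (pvStep_le0 t).mp hs with he0 | he1
      · exact c0 (Or.inl (⟨t, ht, he0⟩))
      · exact c0 (Or.inr (⟨t, ht, he1⟩))
    have hm : pvMinr tags = 1 := by omega
    rw [hm]; rfl
  · have hle : pvMinr tags ≤ 2 := h2.mpr (by
      rcases c2 with ((he0 | he1) | he2)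
      · obtain ⟨t, ht, he⟩ := he0
        exact ⟨t, ht, (pvStep_le2 t).mpr (Or.inr (Or.inr (Or.inr (Or.inr (Or.inr (Or.inr (Or.inr (Or.inr (Or.inl (he))))))))))⟩
      · obtain ⟨t, ht, he⟩ := he1
        exact ⟨t, ht, (pvStep_le2 t).mpr (Or.inr (Or.inr (Or.inr (Or.inr (Or.inr (Or.inr (Or.inr (Or.inr (Or.inr (Or.inl (he)))))))))))⟩
      · obtain ⟨t, ht, he⟩ := he2
        exact ⟨t, ht, (pvStep_le2 t).mpr (Or.inr (Or.inr (Or.inr (Or.inr (Or.inr (Or.inr (Or.inr (Or.inr (Or.inr (Or.inr (he)))))))))))⟩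
      )
    have hgt : ¬ pvMinr tags ≤ 1 := by
      intro hcon
      rcases h1.mp hcon with ⟨t, ht, hs⟩
      rcases (pvStep_le1 t).mp hs with he0 | he1 | he2 | he3 | he4 | he5 | he6 | he7
      · exact c0 (Or.inl (⟨t, ht, he0⟩))
      · exact c0 (Or.inr (⟨t, ht, he1⟩))
      · exact c1 (Or.inl (Or.inl (Or.inl (Or.inl (Or.inl (⟨t, ht, he2⟩))))))
      · exact c1 (Or.inl (Or.inl (Or.inl (Or.inl (Or.inr (⟨t, ht, he3⟩))))))
      · exact c1 (Or.inl (Or.inl (Or.inl (Or.inr (⟨t, ht, he4⟩)))))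
      · exact c1 (Or.inl (Or.inl (Or.inr (⟨t, ht, he5⟩))))
      · exact c1 (Or.inl (Or.inr (⟨t, ht, he6⟩)))
      · exact c1 (Or.inr (⟨t, ht, he7⟩))
    have hm : pvMinr tags = 2 := by omega
    rw [hm]; rfl
  · have hle : pvMinr tags ≤ 3 := h3.mpr (by
      rcases c3 with (he0 | he1)
      · obtain ⟨t, ht, he⟩ := he0
        exact ⟨t, ht, (pvStep_le3 t).mpr (Or.inr (Or.inr (Or.inr (Or.inr (Or.inr (Or.inr (Or.inr (Or.inr (Or.inr (Or.inr (Or.inr (Or.inl (he)))))))))))))⟩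
      · obtain ⟨t, ht, he⟩ := he1
        exact ⟨t, ht, (pvStep_le3 t).mpr (Or.inr (Or.inr (Or.inr (Or.inr (Or.inr (Or.inr (Or.inr (Or.inr (Or.inr (Or.inr (Or.inr (Or.inr (he)))))))))))))⟩
      )
    have hgt : ¬ pvMinr tags ≤ 2 := by
      intro hcon
      rcases h2.mp hcon with ⟨t, ht, hs⟩
      rcases (pvStep_le2 t).mp hs with he0 | he1 | he2 | he3 | he4 | he5 | he6 | he7 | he8 | he9 | he10
      · exact c0 (Or.inl (⟨t, ht, he0⟩))
      · exact c0 (Or.inr (⟨t, ht, he1⟩))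
      · exact c1 (Or.inl (Or.inl (Or.inl (Or.inl (Or.inl (⟨t, ht, he2⟩))))))
      · exact c1 (Or.inl (Or.inl (Or.inl (Or.inl (Or.inr (⟨t, ht, he3⟩))))))
      · exact c1 (Or.inl (Or.inl (Or.inl (Or.inr (⟨t, ht, he4⟩)))))
      · exact c1 (Or.inl (Or.inl (Or.inr (⟨t, ht, he5⟩))))
      · exact c1 (Or.inl (Or.inr (⟨t, ht, he6⟩)))
      · exact c1 (Or.inr (⟨t, ht, he7⟩))
      · exact c2 (Or.inl (Or.inl (⟨t, ht, he8⟩)))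
      · exact c2 (Or.inl (Or.inr (⟨t, ht, he9⟩)))
      · exact c2 (Or.inr (⟨t, ht, he10⟩))
    have hm : pvMinr tags = 3 := by omega
    rw [hm]; rfl
  · have hhi := pvMinr_le_four tags
    have hgt : ¬ pvMinr tags ≤ 3 := by
      intro hcon
      rcases h3.mp hcon with ⟨t, ht, hs⟩
      rcases (pvStep_le3 t).mp hs with he0 | he1 | he2 | he3 | he4 | he5 | he6 | he7 | he8 | he9 | he10 | he11 | he12
      · exact c0 (Or.inl (⟨t, ht, he0⟩))
      · exact c0 (Or.inr (⟨t, ht, he1⟩))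
      · exact c1 (Or.inl (Or.inl (Or.inl (Or.inl (Or.inl (⟨t, ht, he2⟩))))))
      · exact c1 (Or.inl (Or.inl (Or.inl (Or.inl (Or.inr (⟨t, ht, he3⟩))))))
      · exact c1 (Or.inl (Or.inl (Or.inl (Or.inr (⟨t, ht, he4⟩)))))
      · exact c1 (Or.inl (Or.inl (Or.inr (⟨t, ht, he5⟩))))
      · exact c1 (Or.inl (Or.inr (⟨t, ht, he6⟩)))
      · exact c1 (Or.inr (⟨t, ht, he7⟩))
      · exact c2 (Or.inl (Or.inl (⟨t, ht, he8⟩)))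
      · exact c2 (Or.inl (Or.inr (⟨t, ht, he9⟩)))
      · exact c2 (Or.inr (⟨t, ht, he10⟩))
      · exact c3 (Or.inl (⟨t, ht, he11⟩))
      · exact c3 (Or.inr (⟨t, ht, he12⟩))
    have hm : pvMinr tags = 4 := by omega
    rw [hm]; rfl
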